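-- pv_equiv track=rewrite | github.com/AkaiGameDev/GenLang | Python Scripts/phonologyGen.py | trim_columns
-- ===== SOURCE A (Python) =====
-- def trim_columns(table, header_rows):
--     empty_column_indices = []
--     for i in range(len(table[0])):
--         is_empty = True
--         for r in table:
--             if r[i] != '' and table.index(r) >= header_rows:
--                 is_empty = False
--         if is_empty:
--             empty_column_indices.append(i)
--
--     for i in reversed(empty_column_indices):
--         for j, r in enumerate(table):
--             table[j].pop(i)
--
--     return table
-- ===== SOURCE B (Python) =====
-- def trim_columns(table, header_rows):
--     # One-pass rewrite: build a keep-bitmap from the body rows, then filter each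
--     # row in place (rows are mutated in place and the table returned, as in-place
--     # column removal requires).
--     ncols = len(table[0])
--     keep = [False] * ncols
--     for idx, r in enumerate(table):
--         if idx >= header_rows:
--             for i in range(ncols):
--                 if r[i] != '':
--                     keep[i] = True
--     for r in table:
--         r[:] = [x for i, x in enumerate(r) if i >= ncols or keep[i]]
--     return table
-- ===== Notes on version B (the rewrite author's own statement) =====
-- stated objective: faster
-- what changed: Replaces A's per-column scan that calls table.index(r) inside the inner loop by one enumerate pass over the rows building a keep-bitmap, then filters each row on the bitmap instead of repeated pop() calls; Pre_ excludes tables where a row at index >= header_rows equals a header row, on which A's value-based table.index first-match lookup treats that body row as a header (a first-vs-last-match-on-duplicates corner).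
-- outside the precondition, e.g. on trim_columns([['a'], [''], ['a']], 1): A returns [[], [], []], B returns [['a'], [''], ['a']]
import Mathlib
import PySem

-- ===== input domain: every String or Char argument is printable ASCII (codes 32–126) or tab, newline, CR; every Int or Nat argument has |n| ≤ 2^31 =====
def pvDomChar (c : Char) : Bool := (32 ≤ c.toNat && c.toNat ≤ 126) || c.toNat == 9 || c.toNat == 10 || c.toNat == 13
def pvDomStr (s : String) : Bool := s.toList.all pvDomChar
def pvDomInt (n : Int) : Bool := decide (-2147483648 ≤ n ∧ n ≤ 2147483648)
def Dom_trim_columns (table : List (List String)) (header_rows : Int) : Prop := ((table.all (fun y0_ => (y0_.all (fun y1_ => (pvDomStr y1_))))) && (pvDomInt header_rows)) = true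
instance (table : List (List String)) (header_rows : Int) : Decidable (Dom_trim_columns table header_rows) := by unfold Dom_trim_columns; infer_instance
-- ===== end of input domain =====

-- B replaces A's cols×rows² nested scans (list.index inside the inner loop) by one enumerate
-- pass building a keep-bitmap, then filters each row on the bitmap; both Pythons mutate the
-- rows in place, the equivalence proved is about the returned value.

-- ===== PORT A =====
def trim_columns (table : List (List String)) (header_rows : Int) : List (List String) :=
  let empty_column_indices : List Int :=
    (PySem.List.pyRange 0 (((PySem.List.pyGet? table 0).getD []).length : Int) 1).foldl
      (fun acc i =>
        let is_empty := table.foldl (fun b r =>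
          if PySem.List.pyGetD r i "" ≠ "" ∧
             header_rows ≤ (((PySem.List.index? table r).getD 0 : Nat) : Int) then false else b) true
        if is_empty then acc ++ [i] else acc) []
  empty_column_indices.reverse.foldl
    (fun t i => t.map (fun row => ((PySem.List.pop? row i).map Prod.snd).getD row)) table

-- ===== PORT B =====
def trim_columns_alt (table : List (List String)) (header_rows : Int) : List (List String) :=
  let ncols := (table.headD []).length
  let keep := (PySem.List.enumerate table 0).foldl (fun k p =>
      if header_rows ≤ p.1 then
        (List.range ncols).foldl
          (fun k i => if p.2.getD i "" ≠ "" then k.set i true else k) k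
      else k)
    (List.replicate ncols false)
  table.map (fun r => (PySem.List.enumerate r 0).filterMap
    (fun p => if (ncols : Int) ≤ p.1 ∨ keep.getD p.1.toNat false then some p.2 else none))

-- ===== PRECONDITION & SPEC =====
-- Pre_ excludes the inputs on which A raises — the empty table (table[0] → IndexError) and
-- tables where some row is shorter than the first row (r[i] → IndexError) — and additionally
-- tables in which a row at index ≥ header_rows equals a header row, on which A's value-based
-- table.index first-match lookup treats that body row as a header (a first-vs-last-match
-- corner on duplicate rows).
def Pre_trim_columns (table : List (List String)) (header_rows : Int) : Prop :=
  table ≠ [] ∧ (∀ r ∈ table, (table.headD []).length ≤ r.length) ∧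
    ∀ r ∈ table.drop (max header_rows 0).toNat, r ∉ table.take (max header_rows 0).toNat
instance (table : List (List String)) (header_rows : Int) : Decidable (Pre_trim_columns table header_rows) := by unfold Pre_trim_columns; infer_instance
def pvWitness_trim_columns : List (List String) × Int := ([["h", ""], ["a", ""], ["b", ""]], 1)

def Spec_trim_columns (table : List (List String)) (header_rows : Int) (out : List (List String)) : Prop := out = trim_columns_alt table header_rows
instance (table : List (List String)) (header_rows : Int) (out : List (List String)) : Decidable (Spec_trim_columns table header_rows out) := by unfold Spec_trim_columns; infer_instance

-- ===== CLAIM (what is proved, stated in full; the proofs are below) =====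
def Claim_equal_trim_columns : Prop := ∀ (table : List (List String)) (header_rows : Int), Dom_trim_columns table header_rows → Pre_trim_columns table header_rows → Spec_trim_columns table header_rows (trim_columns table header_rows)

-- ===== LEMMAS AND PROOFS =====
theorem pvA_eval (r0 : List String) (t : List (List String)) (h : Int) :
    trim_columns (r0 :: t) h =
      (((List.range r0.length).filter
          (fun k => (r0 :: t).foldl (fun b r =>
            if PySem.List.pyGetD r ((k : Nat) : Int) "" ≠ "" ∧
               h ≤ (((PySem.List.index? (r0 :: t) r).getD 0 : Nat) : Int) then false else b) true)).reverse).foldl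
        (fun tb k => tb.map (fun row => ((PySem.List.pop? row ((k : Nat) : Int)).map Prod.snd).getD row)) (r0 :: t) := by
  simp only [trim_columns]
  have h0 : (PySem.List.pyGet? (r0 :: t) 0).getD [] = r0 := by
    simp [pysem]
  rw [h0]
  have hR : PySem.List.pyRange 0 ((r0.length : Nat) : Int) 1
      = (List.range r0.length).map (fun k => ((k : Nat) : Int)) := by
    rw [PySem.List.pyRange_one]
    simp
  rw [hR]
  rw [PySem.List.foldl_append_ite_eq_filter]
  rw [List.filter_map, List.nil_append, ← List.map_reverse, List.foldl_map]
  congr 1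
  congr 1
  congr 1
  funext k
  simp [Function.comp]

def pvKeep (q : Nat → Bool) : List String → Nat → List String
  | [], _ => []
  | x :: xs, j => if q j then x :: pvKeep q xs (j+1) else pvKeep q xs (j+1)

theorem pvKeep_congr {q q' : Nat → Bool} : ∀ (xs : List String) (j : Nat),
    (∀ i, j ≤ i → i < j + xs.length → q i = q' i) → pvKeep q xs j = pvKeep q' xs j := by
  intro xs
  induction xs with
  | nil => intro j h; rfl
  | cons x xs ih =>
    intro j h
    have hj : q j = q' j := h j le_rfl (by simp)
    simp only [pvKeep, hj]
    have := ih (j+1) (fun i h1 h2 => h i (by omega) (by simp at h2 ⊢; omega))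
    rw [this]

theorem pvKeep_append (q : Nat → Bool) : ∀ (xs ys : List String) (j : Nat),
    pvKeep q (xs ++ ys) j = pvKeep q xs j ++ pvKeep q ys (j + xs.length) := by
  intro xs
  induction xs with
  | nil => intro ys j; simp [pvKeep]
  | cons x xs ih =>
    intro ys j
    simp only [List.cons_append, pvKeep, ih, List.length_cons]
    have : j + (xs.length + 1) = j + 1 + xs.length := by omega
    rw [this]
    by_cases h : q j = true
    · simp [h]
    · simp [h]

theorem pvKeep_all_true {q : Nat → Bool} : ∀ (xs : List String) (j : Nat),
    (∀ i, j ≤ i → q i = true) → pvKeep q xs j = xs := by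
  intro xs
  induction xs with
  | nil => intro j _; rfl
  | cons x xs ih =>
    intro j h
    simp only [pvKeep, h j le_rfl, if_true]
    rw [ih (j+1) (fun i hi => h i (by omega))]

theorem pvFoldFalse {α : Type} (C : α → Prop) [DecidablePred C] :
    ∀ (l : List α) (b : Bool),
    l.foldl (fun b r => if C r then false else b) b = (b && !l.any (fun r => decide (C r))) := by
  intro l
  induction l with
  | nil => intro b; simp
  | cons x l ih =>
    intro b
    rw [List.foldl_cons]
    by_cases h : C x
    · rw [if_pos h, ih]; simp [h]
    · rw [if_neg h, ih]; simp [h]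

theorem pvFoldMapPop {β : Type} (f : List String → β → List String) :
    ∀ (is : List β) (t : List (List String)),
    is.foldl (fun t i => t.map (fun row => f row i)) t = t.map (fun row => is.foldl f row) := by
  intro is
  induction is with
  | nil => intro t; simp
  | cons i is ih =>
    intro t
    simp only [List.foldl_cons, ih, List.map_map]
    rfl

theorem pvPops (pb : Nat → Bool) : ∀ (n : Nat) (row : List String), n ≤ row.length →
    ((List.range n).filter pb).reverse.foldl
        (fun r k => ((PySem.List.pop? r ((k : Nat) : Int)).map Prod.snd).getD r) row
      = pvKeep (fun j => decide (n ≤ j) || !pb j) row 0 := by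
  intro n
  induction n with
  | zero =>
    intro row _
    simp only [List.range_zero, List.filter_nil, List.reverse_nil, List.foldl_nil]
    rw [pvKeep_all_true row 0 (fun i _ => by simp)]
  | succ n ih =>
    intro row hlen
    have hn : n < row.length := by omega
    rw [List.range_succ, List.filter_append]
    by_cases hpb : pb n = true
    · simp only [List.filter_cons, hpb, if_pos, List.filter_nil, List.reverse_append,
        List.reverse_cons, List.reverse_nil, List.nil_append, List.cons_append,
        List.foldl_cons]
      have hpop : PySem.List.pop? row ((n : Nat) : Int) = some (row[n], row.eraseIdx n) :=
        PySem.List.pop?_natCast row n hn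
      rw [hpop]
      simp only [Option.map_some, Option.getD_some]
      have herlen : n ≤ (row.eraseIdx n).length := by
        rw [List.length_eraseIdx_of_lt hn]; omega
      rw [ih (row.eraseIdx n) herlen]
      rw [List.eraseIdx_eq_take_drop_succ]
      rw [pvKeep_append]
      have htk : (row.take n).length = n := by simp; omega
      rw [htk]
      conv_rhs => rw [← List.take_append_drop n row, List.drop_eq_getElem_cons hn]
      rw [pvKeep_append, htk]
      have h1 : pvKeep (fun j => decide (n ≤ j) || !pb j) (row.take n) 0
          = pvKeep (fun j => decide (n + 1 ≤ j) || !pb j) (row.take n) 0 := by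
        apply pvKeep_congr
        intro i _ hi2
        rw [Nat.zero_add, List.length_take] at hi2
        have hlt : i < n := by omega
        have ha : ¬ (n ≤ i) := by omega
        have hb : ¬ (n + 1 ≤ i) := by omega
        simp [ha, hb]
      rw [h1]
      congr 1
      show _ = pvKeep _ (row[n] :: row.drop (n+1)) (0 + n)
      simp only [pvKeep, Nat.zero_add]
      have hq : (decide (n + 1 ≤ n) || !pb n) = false := by simp [hpb]
      rw [hq]
      simp only [Bool.false_eq_true, if_false]
      rw [pvKeep_all_true _ _ (fun i hi => by simp; omega),
          pvKeep_all_true _ _ (fun i hi => by simp; omega)]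
    · simp only [List.filter_cons, hpb, Bool.false_eq_true, if_false, List.filter_nil,
        List.append_nil]
      rw [ih row (by omega)]
      apply pvKeep_congr
      intro i _ _
      by_cases hi : i = n
      · subst hi; simp [hpb]
      · rcases Nat.lt_or_ge i n with hlt | hge
        · have h1 : ¬ (n ≤ i) := by omega
          have h2 : ¬ (n + 1 ≤ i) := by omega
          simp [h1, h2]
        · have h1 : n ≤ i := hge
          have h2 : n + 1 ≤ i := by omega
          simp [h1, h2]

theorem pvInnerLen (C : Nat → Prop) [DecidablePred C] :
    ∀ (l : List Nat) (k : List Bool),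
    (l.foldl (fun k i => if C i then k.set i true else k) k).length = k.length := by
  intro l
  induction l with
  | nil => intro k; rfl
  | cons i l ih =>
    intro k
    rw [List.foldl_cons]
    by_cases h : C i
    · rw [if_pos h, ih, List.length_set]
    · rw [if_neg h, ih]

theorem pvInnerGetD (C : Nat → Prop) [DecidablePred C] :
    ∀ (l : List Nat) (k : List Bool) (j : Nat), (∀ i ∈ l, i < k.length) →
    (l.foldl (fun k i => if C i then k.set i true else k) k).getD j false
      = (k.getD j false || (decide (j ∈ l) && decide (C j))) := by
  intro l
  induction l with
  | nil => intro k j _; simp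
  | cons i l ih =>
    intro k j hmem
    rw [List.foldl_cons]
    have hi : i < k.length := hmem i (by simp)
    have hrest : ∀ i' ∈ l, i' < (if C i then k.set i true else k).length := by
      intro i' hi'
      by_cases h : C i
      · rw [if_pos h, List.length_set]; exact hmem i' (by simp [hi'])
      · rw [if_neg h]; exact hmem i' (by simp [hi'])
    rw [ih _ j hrest]
    by_cases hj : j = i
    · subst hj
      by_cases h : C j
      · rw [if_pos h]
        have h2 : (k.set j true).getD j false = true := by
          unfold List.getD
          rw [List.getElem?_set_self hi]
          rfl
        rw [h2]
        simp [h]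
      · rw [if_neg h]
        simp [h]
    · have hster : (if C i then k.set i true else k).getD j false = k.getD j false := by
        by_cases h : C i
        · rw [if_pos h]
          unfold List.getD
          rw [List.getElem?_set_ne (by omega)]
        · rw [if_neg h]
      rw [hster]
      simp [hj]

theorem pvOuterGetD (C : Int → Prop) [DecidablePred C] (n : Nat) :
    ∀ (t : List (Int × List String)) (k : List Bool), k.length = n → ∀ j, j < n →
    ((t.foldl (fun k p => if C p.1 then
        (List.range n).foldl (fun k i => if p.2.getD i "" ≠ "" then k.set i true else k) k
      else k) k).getD j false)
      = (k.getD j false || t.any (fun p => decide (C p.1) && decide (p.2.getD j "" ≠ ""))) := by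
  intro t
  induction t with
  | nil => intro k _ j _; simp
  | cons p t ih =>
    intro k hk j hj
    rw [List.foldl_cons]
    by_cases h : C p.1
    · rw [if_pos h]
      have hlen : ((List.range n).foldl (fun k i => if p.2.getD i "" ≠ "" then k.set i true else k) k).length = n := by
        rw [pvInnerLen, hk]
      rw [ih _ hlen j hj]
      rw [pvInnerGetD _ _ _ j (by intro i hi; rw [hk]; exact List.mem_range.mp hi)]
      have hjr : j ∈ List.range n := List.mem_range.mpr hj
      simp [hjr, h, Bool.or_assoc]
    · rw [if_neg h, ih k hk j hj]
      simp [h]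

theorem pvIdxTake {α : Type} [BEq α] [LawfulBEq α] :
    ∀ (tab : List α) (r : α) (m : Nat), r ∈ tab →
    ((PySem.List.index? tab r).getD 0 < m ↔ r ∈ tab.take m) := by
  intro tab
  induction tab with
  | nil => intro r m h; cases h
  | cons x t ih =>
    intro r m hmem
    by_cases hx : x = r
    · subst hx
      rw [PySem.List.index?_cons_self]
      cases m with
      | zero => simp
      | succ m => simp
    · rw [PySem.List.index?_cons_of_ne t hx]
      have hrt : r ∈ t := by
        rcases List.mem_cons.mp hmem with h | h
        · exact absurd h.symm hx
        · exact h
      have hsome : (PySem.List.index? t r).isSome := (PySem.List.index?_isSome_iff t r).mpr hrt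
      obtain ⟨v, hv⟩ := Option.isSome_iff_exists.mp hsome
      rw [hv]
      simp only [Option.map_some, Option.getD_some]
      cases m with
      | zero => simp
      | succ m =>
        rw [List.take_succ_cons]
        have := ih r m hrt
        rw [hv] at this
        simp only [Option.getD_some] at this
        constructor
        · intro hlt
          exact List.mem_cons_of_mem x (this.mp (by omega))
        · intro hm
          rcases List.mem_cons.mp hm with h | h
          · exact absurd h.symm hx
          · have := this.mpr h; omega

theorem pvKeep_filterMap_enumerate (cP : Int → Prop) [DecidablePred cP] :
    ∀ (xs : List String) (j : Nat),
    (PySem.List.enumerate xs (j : Int)).filterMap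
        (fun p => if cP p.1 then some p.2 else none)
      = pvKeep (fun i => decide (cP (i : Int))) xs j := by
  intro xs
  induction xs with
  | nil => intro j; simp [PySem.List.enumerate_nil, pvKeep]
  | cons x xs ih =>
    intro j
    rw [PySem.List.enumerate_cons, List.filterMap_cons]
    have hc : ((j : Int) + 1) = ((j + 1 : Nat) : Int) := by push_cast; ring
    by_cases h : cP (j : Int)
    · rw [if_pos h, hc, ih]
      simp [pvKeep, h]
    · rw [if_neg h, hc, ih]
      simp [pvKeep, h]

theorem pvKeep_filterMap_enumerate0 (cP : Int → Prop) [DecidablePred cP] (xs : List String) :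
    (PySem.List.enumerate xs 0).filterMap (fun p => if cP p.1 then some p.2 else none)
      = pvKeep (fun i => decide (cP (i : Int))) xs 0 := by
  have := pvKeep_filterMap_enumerate cP xs 0
  simpa using this

theorem pvB_eval (r0 : List String) (t : List (List String)) (h : Int) :
    trim_columns_alt (r0 :: t) h =
      (r0 :: t).map (fun r => pvKeep (fun j =>
        decide ((r0.length : Int) ≤ (j : Int) ∨
          ((PySem.List.enumerate (r0 :: t) 0).foldl (fun k p =>
              if h ≤ p.1 then
                (List.range r0.length).foldl
                  (fun k i => if p.2.getD i "" ≠ "" then k.set i true else k) k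
              else k)
            (List.replicate r0.length false)).getD j false = true)) r 0) := by
  simp only [trim_columns_alt, List.headD_cons]
  apply List.map_congr_left
  intro r _
  rw [pvKeep_filterMap_enumerate0 (fun z => (r0.length : Int) ≤ z ∨
      ((PySem.List.enumerate (r0 :: t) 0).foldl (fun k p =>
          if h ≤ p.1 then
            (List.range r0.length).foldl
              (fun k i => if p.2.getD i "" ≠ "" then k.set i true else k) k
          else k)
        (List.replicate r0.length false)).getD z.toNat false = true) r]
  congr 1

theorem pvAnyEq (tab : List (List String)) (h : Int) (j : Nat)
    (hnd : ∀ r ∈ tab.drop (max h 0).toNat, r ∉ tab.take (max h 0).toNat) :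
    tab.any (fun r' => decide (PySem.List.pyGetD r' ((j : Nat) : Int) "" ≠ "" ∧
        h ≤ (((PySem.List.index? tab r').getD 0 : Nat) : Int)))
      = (PySem.List.enumerate tab 0).any
          (fun p => decide (h ≤ p.1) && decide (p.2.getD j "" ≠ "")) := by
  rw [Bool.eq_iff_iff]
  simp only [List.any_eq_true]
  constructor
  · rintro ⟨r', hr', hc⟩
    rw [decide_eq_true_eq] at hc
    obtain ⟨hc1, hc2⟩ := hc
    set fi : Nat := (PySem.List.index? tab r').getD 0 with hfi
    have hsome : (PySem.List.index? tab r').isSome :=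
      (PySem.List.index?_isSome_iff tab r').mpr hr'
    obtain ⟨v, hv⟩ := Option.isSome_iff_exists.mp hsome
    obtain ⟨hk, hget, _⟩ := PySem.List.getElem_of_index?_eq_some hv
    have hfv : fi = v := by rw [hfi, hv]; rfl
    refine ⟨((fi : Int), r'), ?_, ?_⟩
    · rw [PySem.List.mem_enumerate_iff]
      refine ⟨fi, by omega, ?_⟩
      have : tab[fi] = r' := by
        subst hfv; exact hget
      rw [this]
      simp
    · rw [PySem.List.pyGetD_natCast] at hc1
      simp only [Bool.and_eq_true, decide_eq_true_eq]
      exact ⟨hc2, hc1⟩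
  · rintro ⟨p, hp, hc⟩
    rw [Bool.and_eq_true, decide_eq_true_eq, decide_eq_true_eq] at hc
    obtain ⟨hle, hne⟩ := hc
    rw [PySem.List.mem_enumerate_iff] at hp
    obtain ⟨k, hk, hpk⟩ := hp
    subst hpk
    simp only at hle hne
    have hr' : tab[k] ∈ tab := List.getElem_mem hk
    refine ⟨tab[k], hr', ?_⟩
    rw [decide_eq_true_eq, PySem.List.pyGetD_natCast]
    refine ⟨hne, ?_⟩
    by_contra hcon
    push Not at hcon
    set fi : Nat := (PySem.List.index? tab tab[k]).getD 0 with hfi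
    have hm : (max h 0).toNat ≤ k := by omega
    have hfil : fi < (max h 0).toNat := by omega
    have htk : tab[k] ∈ tab.take (max h 0).toNat := (pvIdxTake tab tab[k] _ hr').mp hfil
    have hdr : tab[k] ∈ tab.drop (max h 0).toNat := by
      have hk2 : k - (max h 0).toNat < (tab.drop (max h 0).toNat).length := by
        rw [List.length_drop]; omega
      have : (tab.drop (max h 0).toNat)[k - (max h 0).toNat] = tab[k] := by
        rw [List.getElem_drop]
        congr 1
        omega
      rw [← this]
      exact List.getElem_mem hk2
    exact hnd tab[k] hdr htk

theorem pvMain (table : List (List String)) (h : Int)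
    (hne : table ≠ []) (hlen : ∀ r ∈ table, (table.headD []).length ≤ r.length)
    (hnd : ∀ r ∈ table.drop (max h 0).toNat, r ∉ table.take (max h 0).toNat) :
    trim_columns table h = trim_columns_alt table h := by
  cases table with
  | nil => exact absurd rfl hne
  | cons r0 t =>
    simp only [List.headD_cons] at hlen
    rw [pvA_eval, pvB_eval, pvFoldMapPop]
    apply List.map_congr_left
    intro r hr
    rw [pvPops _ r0.length r (hlen r hr)]
    congr 1
    funext j
    rcases Nat.lt_or_ge j r0.length with hj | hj
    · have h1 : ¬ (r0.length ≤ j) := by omega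
      have h2 : ¬ ((r0.length : Int) ≤ (j : Int)) := by exact_mod_cast h1
      rw [pvFoldFalse]
      rw [pvOuterGetD (fun z => h ≤ z) _ (PySem.List.enumerate (r0 :: t) 0) _ (by simp) j hj]
      have hrep : (List.replicate r0.length false).getD j false = false := by
        unfold List.getD
        simp
      rw [hrep]
      simp only [h1, h2, decide_false, Bool.false_or, Bool.true_and, Bool.not_not,
        false_or, Bool.decide_coe]
      exact pvAnyEq (r0 :: t) h j hnd
    · have h1 : r0.length ≤ j := hj
      have h2 : ((r0.length : Int) ≤ (j : Int)) := by exact_mod_cast h1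
      simp [h1, h2]

-- ===== VERDICT (by name: the statement is the Claim_ definition above) =====
theorem trim_columns_spec : Claim_equal_trim_columns := by
  unfold Claim_equal_trim_columns
  intro table h _ hpre
  unfold Spec_trim_columns
  exact pvMain table h hpre.1 hpre.2.1 hpre.2.2
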